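-- pv_equiv track=rewrite | github.com/bioinform/Daedalus | packages/parse-umi/parseUMI/parseUMI.py | get_umi_pattern
-- ===== SOURCE A (Python) =====
-- def get_umi_pattern(umi):
--     """
--     Parameters
--     ----------
--     umi : str
--     the umi pattern to parse
--
--     Returns
--     -------
--     (min,max) tuple of UMI positions
--     """
--     if not umi == "":
--         pattern = []
--         i = 0
--         for char in umi:
--             if char == "N":
--                 pattern.append(i)
--             i +=1
--         return (min(pattern), max(pattern))
--     else:
--         return (0,0)
-- ===== SOURCE B (Python) =====
-- def get_umi_pattern(umi):
--     """
--     Parameters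
--     ----------
--     umi : str
--     the umi pattern to parse
--
--     Returns
--     -------
--     (min,max) tuple of UMI positions
--     """
--     if umi == "":
--         return (0, 0)
--     return (umi.index("N"), umi.rindex("N"))
-- ===== Notes on version B (the rewrite author's own statement) =====
-- stated objective: idiomatic
-- what changed: Replaces the index-counting loop plus list of all N positions with the built-in forward and reverse substring searches str.index/str.rindex, eliminating the loop and accumulator.
import Mathlib
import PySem

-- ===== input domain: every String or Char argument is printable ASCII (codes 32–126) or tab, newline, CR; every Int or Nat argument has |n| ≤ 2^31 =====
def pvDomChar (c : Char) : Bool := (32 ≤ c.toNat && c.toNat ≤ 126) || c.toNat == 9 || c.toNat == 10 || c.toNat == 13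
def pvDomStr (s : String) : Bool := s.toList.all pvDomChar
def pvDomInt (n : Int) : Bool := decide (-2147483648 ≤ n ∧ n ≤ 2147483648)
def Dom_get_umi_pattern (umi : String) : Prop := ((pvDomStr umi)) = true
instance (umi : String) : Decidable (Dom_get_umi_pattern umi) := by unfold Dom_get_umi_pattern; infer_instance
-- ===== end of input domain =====

-- B replaces A's index-counting loop and list of all N positions by the built-in
-- forward/reverse searches (str.index / str.rindex): more idiomatic, no accumulator.


-- ===== PORT A =====
def get_umi_pattern (umi : String) : Int × Int :=
  if !(umi == "") then
    -- pattern = []; i = 0; for char in umi: if char == "N": pattern.append(i); i += 1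
    let st := umi.toList.foldl
      (fun (st : List Int × Int) char =>
        if char == 'N' then (st.1 ++ [st.2], st.2 + 1) else (st.1, st.2 + 1))
      ([], 0)
    -- return (min(pattern), max(pattern))  -- min/max of [] raises ValueError: outside Pre_
    ((PySem.List.min? st.1 (fun x => x)).getD 0, (PySem.List.max? st.1 (fun x => x)).getD 0)
  else (0, 0)

-- ===== PORT B =====
-- umi.index("N") / umi.rindex("N"); they raise ValueError when 'N' is absent (outside Pre_),
-- where PySem.Str.find/rfind return -1.
def get_umi_pattern_alt (umi : String) : Int × Int :=
  if umi == "" then (0, 0)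
  else (PySem.Str.find umi "N", PySem.Str.rfind umi "N")

-- ===== PRECONDITION & SPEC =====
-- Pre_ excludes exactly the inputs where A raises ValueError (min/max of the empty list):
-- a non-empty umi containing no 'N'; B's index/rindex raise ValueError there too.
def Pre_get_umi_pattern (umi : String) : Prop :=
  umi = "" ∨ PySem.Str.isIn "N" umi = true
instance (umi : String) : Decidable (Pre_get_umi_pattern umi) := by
  unfold Pre_get_umi_pattern; infer_instance
def pvWitness_get_umi_pattern : String := "ACNNG"

def Spec_get_umi_pattern (umi : String) (out : Int × Int) : Prop := out = get_umi_pattern_alt umi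
instance (umi : String) (out : Int × Int) : Decidable (Spec_get_umi_pattern umi out) := by
  unfold Spec_get_umi_pattern; infer_instance

-- ===== CLAIM (what is proved, stated in full; the proofs are below) =====
def Claim_equal_get_umi_pattern : Prop :=
  ∀ (umi : String), Dom_get_umi_pattern umi → Pre_get_umi_pattern umi →
    Spec_get_umi_pattern umi (get_umi_pattern umi)

-- ===== LEMMAS AND PROOFS =====

-- the list of indices at which 'N' occurs in l, offset by i
def nIdx : List Char → Int → List Int
  | [], _ => []
  | c :: t, i => if c = 'N' then i :: nIdx t (i + 1) else nIdx t (i + 1)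

lemma fold_eq (l : List Char) : ∀ (acc : List Int) (i : Int),
    l.foldl (fun (st : List Int × Int) char =>
        if char == 'N' then (st.1 ++ [st.2], st.2 + 1) else (st.1, st.2 + 1)) (acc, i)
      = (acc ++ nIdx l i, i + l.length) := by
  induction l with
  | nil => intro acc i; simp [nIdx]
  | cons c t ih =>
    intro acc i
    show List.foldl _ (if c == 'N' then (acc ++ [i], i + 1) else (acc, i + 1)) t = _
    by_cases hc : c = 'N'
    · rw [if_pos (by simp [hc]), ih]
      subst hc
      rw [nIdx, if_pos rfl]
      simp only [List.append_assoc, List.singleton_append, List.length_cons, Prod.mk.injEq]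
      exact ⟨trivial, by push_cast; omega⟩
    · rw [if_neg (by simp [hc]), ih]
      simp only [nIdx, if_neg hc, List.length_cons, Prod.mk.injEq]
      exact ⟨trivial, by push_cast; omega⟩

lemma mem_nIdx (l : List Char) : ∀ (i j : Int),
    j ∈ nIdx l i ↔ ∃ k : Nat, k < l.length ∧ l[k]? = some 'N' ∧ j = i + k := by
  induction l with
  | nil => intro i j; simp [nIdx]
  | cons c t ih =>
    intro i j
    by_cases hc : c = 'N'
    · subst hc
      rw [nIdx, if_pos rfl]
      simp only [List.mem_cons, ih]
      constructor
      · rintro (rfl | ⟨k, hk, hN, rfl⟩)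
        · exact ⟨0, by simp, by simp, by simp⟩
        · exact ⟨k + 1, by simpa using hk, by simpa using hN, by push_cast; ring⟩
      · rintro ⟨k, hk, hN, rfl⟩
        cases k with
        | zero => left; simp
        | succ k =>
          right
          exact ⟨k, by simpa using hk, by simpa using hN, by push_cast; ring⟩
    · rw [nIdx, if_neg hc, ih]
      constructor
      · rintro ⟨k, hk, hN, rfl⟩
        exact ⟨k + 1, by simpa using hk, by simpa using hN, by push_cast; ring⟩
      · rintro ⟨k, hk, hN, rfl⟩
        cases k with
        | zero => simp at hN; exact absurd hN hc
        | succ k =>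
          exact ⟨k, by simpa using hk, by simpa using hN, by push_cast; ring⟩

lemma singleton_prefix_drop (c : Char) (l : List Char) (m : Nat) :
    [c] <+: l.drop m ↔ l[m]? = some c := by
  rw [← List.head?_drop]
  cases l.drop m with
  | nil => simp
  | cons x t => simp [List.cons_prefix_iff]

lemma rfind_go_eq (l : List Char) (k : Nat) (hN : l[k]? = some 'N') :
    ∀ (j : Nat), k ≤ j → (∀ m : Nat, k < m → m ≤ j → l[m]? ≠ some 'N') →
      PySem.Chars.rfind.go l ['N'] j = (k : Int) := by
  intro j
  induction j with
  | zero =>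
    intro hkj _
    interval_cases k
    have : ['N'].isPrefixOf l = true := by
      rw [List.isPrefixOf_iff_prefix]
      simpa using (singleton_prefix_drop 'N' l 0).2 (by simpa using hN)
    simp [PySem.Chars.rfind.go, this]
  | succ j ih =>
    intro hkj hmax
    by_cases hp : ['N'].isPrefixOf (l.drop (j + 1)) = true
    · have hj1 : l[j + 1]? = some 'N' :=
        (singleton_prefix_drop 'N' l (j + 1)).1 (List.isPrefixOf_iff_prefix.1 hp)
      have hk1 : k = j + 1 := by
        by_contra hne
        exact hmax (j + 1) (by omega) (le_refl _) hj1
      simp [PySem.Chars.rfind.go, hp, hk1]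
    · have hk1 : k ≠ j + 1 := by
        intro h; rw [h] at hN
        exact hp (List.isPrefixOf_iff_prefix.2 ((singleton_prefix_drop 'N' l (j + 1)).2 hN))
      have : PySem.Chars.rfind.go l ['N'] (j + 1) = PySem.Chars.rfind.go l ['N'] j := by
        simp [PySem.Chars.rfind.go, hp]
      rw [this]
      exact ih (by omega) (fun m hm1 hm2 => hmax m hm1 (by omega))

-- ===== VERDICT (by name: the statement is the Claim_ definition above) =====
theorem get_umi_pattern_spec : Claim_equal_get_umi_pattern := by
  intro umi _hdom hpre
  unfold Spec_get_umi_pattern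
  rcases hpre with rfl | hin
  · rfl
  · -- 'N' occurs in umi; both sides are analysed over l := umi.toList
    have hinf : ['N'] <:+: umi.toList := by
      rw [← PySem.Chars.isIn_iff_infix]
      simpa using hin
    have hmem : 'N' ∈ umi.toList := hinf.sublist.subset (by simp)
    have hne : ¬ umi = "" := by
      rintro rfl
      exact absurd hin (by decide)
    -- the A-side pattern list
    have hfold := fold_eq umi.toList [] 0
    -- find: the least N-index
    have hf0 : 0 ≤ PySem.Chars.find umi.toList ['N'] :=
      (PySem.Chars.find_nonneg_iff umi.toList ['N']).2 hinf
    obtain ⟨hfpre, hfmin⟩ := PySem.Chars.find_spec hf0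
    have hfget : umi.toList[(PySem.Chars.find umi.toList ['N']).toNat]? = some 'N' :=
      (singleton_prefix_drop 'N' umi.toList _).1 hfpre
    have hflt : (PySem.Chars.find umi.toList ['N']).toNat < umi.toList.length :=
      (List.getElem?_eq_some_iff.1 hfget).1
    have hfmem : ((PySem.Chars.find umi.toList ['N']).toNat : Int) ∈ nIdx umi.toList 0 :=
      (mem_nIdx umi.toList 0 _).2 ⟨_, hflt, hfget, by simp⟩
    -- min? of the pattern is find
    obtain ⟨m, hm⟩ : ∃ m, PySem.List.min? (nIdx umi.toList 0) (fun x => x) = some m := by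
      cases h : PySem.List.min? (nIdx umi.toList 0) (fun x => x) with
      | none =>
        rw [PySem.List.min?_eq_none_iff] at h
        rw [h] at hfmem
        exact absurd hfmem (List.not_mem_nil)
      | some m => exact ⟨m, rfl⟩
    have hmmem := PySem.List.min?_mem hm
    obtain ⟨km, hkmlt, hkmget, hkm⟩ := (mem_nIdx umi.toList 0 m).1 hmmem
    have hmin := PySem.List.min?_isMin hm
    have hkmge : (PySem.Chars.find umi.toList ['N']).toNat ≤ km := by
      by_contra h
      exact hfmin km (by omega) ((singleton_prefix_drop 'N' umi.toList km).2 hkmget)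
    have hmeq : m = PySem.Chars.find umi.toList ['N'] := by
      have h1 := hmin _ hfmem
      have := Int.toNat_of_nonneg hf0
      simp only at h1
      omega
    -- max? of the pattern is rfind
    obtain ⟨M, hM⟩ : ∃ M, PySem.List.max? (nIdx umi.toList 0) (fun x => x) = some M := by
      cases h : PySem.List.max? (nIdx umi.toList 0) (fun x => x) with
      | none =>
        rw [PySem.List.max?_eq_none_iff] at h
        rw [h] at hfmem
        exact absurd hfmem (List.not_mem_nil)
      | some M => exact ⟨M, rfl⟩
    have hMmem := PySem.List.max?_mem hM
    obtain ⟨kM, hkMlt, hkMget, hkM⟩ := (mem_nIdx umi.toList 0 M).1 hMmem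
    have hmax := PySem.List.max?_isMax hM
    have hMeq : PySem.Chars.rfind umi.toList ['N'] = M := by
      have hgo := rfind_go_eq umi.toList kM hkMget umi.toList.length (by omega)
        (fun j hj1 hj2 hjget => by
          have hjlt : j < umi.toList.length := (List.getElem?_eq_some_iff.1 hjget).1
          have : (j : Int) ∈ nIdx umi.toList 0 :=
            (mem_nIdx umi.toList 0 _).2 ⟨j, hjlt, hjget, by simp⟩
          have := hmax _ this
          simp only at this
          omega)
      show PySem.Chars.rfind.go umi.toList ['N'] umi.toList.length = M
      rw [hgo]; omega
    -- assemble
    show (if !(umi == "") then _ else _) = _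
    rw [if_pos (by simpa using hne)]
    simp only [hfold, List.nil_append, hm, hM, Option.getD_some]
    unfold get_umi_pattern_alt
    rw [if_neg (by simpa using hne)]
    have hNlist : "N".toList = ['N'] := by decide
    simp only [PySem.Str.find_eq, PySem.Str.rfind_eq, hNlist]
    rw [hmeq, hMeq]
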